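-- pv_equiv track=rewrite | github.com/mabrains/gdsfactory | gdsfactory/routing/path_length_from_component.py | find_node_pairs
-- ===== SOURCE A (Python) =====
-- def find_node_pairs(nodes: list[str]) -> list[set[str]]:
--     node_pairs = []
--     for n1 in nodes:
--         for n2 in nodes:
--             if n1 != n2:
--                 s = {n1, n2}
--                 if s not in node_pairs:
--                     node_pairs.append(s)
--     return node_pairs
-- ===== SOURCE B (Python) =====
-- def find_node_pairs(nodes: list[str]) -> list[set[str]]:
--     # Deduplicate first (first-occurrence order), then emit each unordered
--     # pair of distinct names exactly once by structural recursion on the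
--     # unique list -- no membership scan over the output is ever needed.
--     unique = list(dict.fromkeys(nodes))
--
--     def pairs(u):
--         if not u:
--             return []
--         first, rest = u[0], u[1:]
--         return [{first, y} for y in rest] + pairs(rest)
--
--     return pairs(unique)
-- ===== Notes on version B (the rewrite author's own statement) =====
-- stated objective: faster
-- what changed: A's quadratic double loop with an inner 'is this set already in the output list?' scan is replaced by deduplicating the input once (dict.fromkeys) and then generating each unordered pair exactly once by recursion on the unique list, so no membership scan over the output remains.
import Mathlib
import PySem

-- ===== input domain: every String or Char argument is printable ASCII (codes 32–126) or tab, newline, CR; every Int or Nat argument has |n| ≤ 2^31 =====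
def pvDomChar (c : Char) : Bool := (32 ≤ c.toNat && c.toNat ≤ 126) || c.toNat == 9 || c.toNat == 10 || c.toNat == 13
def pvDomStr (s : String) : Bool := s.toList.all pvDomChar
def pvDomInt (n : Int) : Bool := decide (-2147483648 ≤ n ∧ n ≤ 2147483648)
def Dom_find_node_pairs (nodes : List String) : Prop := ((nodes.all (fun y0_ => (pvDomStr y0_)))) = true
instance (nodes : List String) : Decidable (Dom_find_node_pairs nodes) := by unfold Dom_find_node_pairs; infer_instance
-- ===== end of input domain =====

-- B deduplicates the input once and emits each unordered pair exactly once by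
-- recursion on the unique list, replacing A's double loop with its inner
-- membership scan over the output list.


-- ===== PORT A =====
-- s = {n1, n2}  (a 2-element Python set literal)
def pvPair (x y : String) : List String := PySem.Set.ofList [x, y]

-- Python's  's in node_pairs'  (list membership tested with set equality ==)
def pvIn (s : List String) (acc : List (List String)) : Bool :=
  acc.any (fun t => PySem.Set.equal t s)

-- body of A's inner loop
def pvStepA (n1 : String) (acc : List (List String)) (n2 : String) : List (List String) :=
  if n1 ≠ n2 then
    (let s := pvPair n1 n2
     if pvIn s acc = false then acc ++ [s] else acc)
  else acc

def find_node_pairs (nodes : List String) : List (List String) :=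
  nodes.foldl (fun acc n1 => nodes.foldl (pvStepA n1) acc) []

-- ===== PORT B =====
-- pairs(u): [{u[0], y} for y in u[1:]] + pairs(u[1:])
def pvPairsRec : List String → List (List String)
  | [] => []
  | first :: rest => rest.map (fun y => PySem.Set.ofList [first, y]) ++ pvPairsRec rest

def find_node_pairs_alt (nodes : List String) : List (List String) :=
  pvPairsRec (PySem.List.dedup nodes)

-- ===== PRECONDITION & SPEC =====
def Spec_find_node_pairs (nodes : List String) (out : List (List String)) : Prop := out = find_node_pairs_alt nodes
instance (nodes : List String) (out : List (List String)) : Decidable (Spec_find_node_pairs nodes out) := by unfold Spec_find_node_pairs; infer_instance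

-- ===== CLAIM (what is proved, stated in full; the proofs are below) =====
def Claim_equal_find_node_pairs : Prop := ∀ (nodes : List String), Dom_find_node_pairs nodes → Spec_find_node_pairs nodes (find_node_pairs nodes)

-- ===== LEMMAS AND PROOFS =====

-- rows d r: the pairs A has accumulated after its outer loop has consumed d,
-- when the remaining unique names are r (the whole unique list is d ++ r).
def pvRows : List String → List String → List (List String)
  | [], _ => []
  | a :: d, r => (d ++ r).map (fun z => pvPair a z) ++ pvRows d r

-- ----- basic facts about 2-element set literals and set equality -----

theorem pvPair_eq {x y : String} (h : x ≠ y) : pvPair x y = [x, y] := by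
  simp [pvPair, PySem.Set.ofList, PySem.Set.add, PySem.Set.contains, PySem.Set.empty]
  exact Ne.symm h

theorem pvEqual_refl (s : List String) : PySem.Set.equal s s = true := by
  simp [PySem.Set.equal, PySem.Set.issubset, PySem.Set.contains]

theorem pvEqual_two_iff {a b x y : String} (hab : a ≠ b) (hxy : x ≠ y) :
    PySem.Set.equal [a, b] [x, y] = true ↔ ((a = x ∧ b = y) ∨ (a = y ∧ b = x)) := by
  simp [PySem.Set.equal, PySem.Set.issubset, PySem.Set.contains]
  constructor
  · rintro ⟨⟨ha | ha, hb | hb⟩, _⟩ <;> simp_all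
  · rintro (⟨rfl, rfl⟩ | ⟨rfl, rfl⟩) <;> tauto

theorem pvIn_append {s : List String} {acc ext : List (List String)} (h : pvIn s acc = true) :
    pvIn s (acc ++ ext) = true := by
  simp only [pvIn, List.any_append, Bool.or_eq_true]
  exact Or.inl h

theorem pvIn_append_singleton (s t : List String) (acc : List (List String)) :
    pvIn s (acc ++ [t]) = (pvIn s acc || PySem.Set.equal t s) := by
  simp [pvIn, List.any_append]

-- ----- the accumulator only ever grows -----

theorem pvStepA_prefix (x : String) (acc : List (List String)) (y : String) :
    ∃ ext, pvStepA x acc y = acc ++ ext := by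
  by_cases hxy : x ≠ y
  · by_cases hin : pvIn (pvPair x y) acc = false
    · exact ⟨[pvPair x y], by simp [pvStepA, hxy, hin]⟩
    · exact ⟨[], by simp [pvStepA, hxy, hin]⟩
  · exact ⟨[], by simp [pvStepA, hxy]⟩

theorem pvFoldlA_prefix (x : String) :
    ∀ (l : List String) (acc : List (List String)), ∃ ext, l.foldl (pvStepA x) acc = acc ++ ext := by
  intro l
  induction l with
  | nil => exact fun acc => ⟨[], by simp⟩
  | cons y ys ih =>
    intro acc
    obtain ⟨e1, h1⟩ := pvStepA_prefix x acc y
    obtain ⟨e2, h2⟩ := ih (pvStepA x acc y)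
    refine ⟨e1 ++ e2, ?_⟩
    rw [List.foldl_cons, h2, h1, List.append_assoc]

-- ----- generic: folding a step that is idempotent-once over a list equals folding it over the dedup -----

theorem pvFoldl_add_prefix {α : Type} [BEq α] :
    ∀ (l : List α) (s0 : PySem.Set α), ∃ ext, l.foldl PySem.Set.add s0 = s0 ++ ext := by
  intro l
  induction l with
  | nil => exact fun s0 => ⟨[], by simp⟩
  | cons y ys ih =>
    intro s0
    by_cases h : List.contains s0 y = true
    · obtain ⟨e, he⟩ := ih s0
      refine ⟨e, ?_⟩
      rw [List.foldl_cons]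
      have hadd : PySem.Set.add s0 y = s0 := by simp [PySem.Set.add, PySem.Set.contains, h]
      rw [hadd, he]
    · obtain ⟨e, he⟩ := ih (s0 ++ [y])
      refine ⟨y :: e, ?_⟩
      rw [List.foldl_cons]
      have hadd : PySem.Set.add s0 y = s0 ++ [y] := by simp [PySem.Set.add, PySem.Set.contains, h]
      rw [hadd, he]
      simp

theorem pvFoldl_seen {α β : Type} [BEq α] [LawfulBEq α] (step : β → α → β) (Q : α → β → Prop)
    (h1 : ∀ acc y, Q y (step acc y))
    (h2 : ∀ acc y, Q y acc → step acc y = acc)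
    (h3 : ∀ acc y z, Q y acc → Q y (step acc z)) :
    ∀ (l : List α) (acc : β) (s0 : PySem.Set α), (∀ y ∈ s0, Q y acc) →
      l.foldl step acc = ((l.foldl PySem.Set.add s0).drop s0.length).foldl step acc := by
  intro l
  induction l with
  | nil => intro acc s0 _; simp
  | cons y ys ih =>
    intro acc s0 hinv
    rw [List.foldl_cons, List.foldl_cons]
    by_cases hy : List.contains s0 y = true
    · have hymem : y ∈ s0 := by simpa using hy
      have hstep : step acc y = acc := h2 acc y (hinv y hymem)
      have hadd : PySem.Set.add s0 y = s0 := by simp [PySem.Set.add, PySem.Set.contains, hymem]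
      rw [hstep, hadd]
      exact ih acc s0 hinv
    · have hynot : y ∉ s0 := by simpa using hy
      have hadd : PySem.Set.add s0 y = s0 ++ [y] := by simp [PySem.Set.add, PySem.Set.contains, hynot]
      rw [hadd]
      obtain ⟨ext, hext⟩ := pvFoldl_add_prefix ys (s0 ++ [y])
      have hinv' : ∀ z ∈ (s0 ++ [y]), Q z (step acc y) := by
        intro z hz
        rcases List.mem_append.mp hz with hz | hz
        · exact h3 acc z y (hinv z hz)
        · have hzy : z = y := by simpa using hz
          rw [hzy]
          exact h1 acc y
      rw [ih (step acc y) (s0 ++ [y]) hinv', hext, List.drop_left, List.append_assoc,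
        List.drop_left]
      rw [List.singleton_append, List.foldl_cons]

theorem pvFoldl_dedup {α β : Type} [BEq α] [LawfulBEq α] (step : β → α → β) (Q : α → β → Prop)
    (h1 : ∀ acc y, Q y (step acc y))
    (h2 : ∀ acc y, Q y acc → step acc y = acc)
    (h3 : ∀ acc y z, Q y acc → Q y (step acc z))
    (l : List α) (acc : β) :
    l.foldl step acc = (PySem.List.dedup l).foldl step acc := by
  have := pvFoldl_seen step Q h1 h2 h3 l acc PySem.Set.empty (by simp [PySem.Set.empty])
  simpa [PySem.List.dedup, PySem.Set.ofList, PySem.Set.empty] using this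

-- ----- the inner loop: Q is "the pair {x,y} is already recorded (or y = x)" -----

def pvQin (x : String) (y : String) (acc : List (List String)) : Prop :=
  y = x ∨ pvIn (pvPair x y) acc = true

theorem pvQin_h1 (x : String) (acc : List (List String)) (y : String) : pvQin x y (pvStepA x acc y) := by
  by_cases hxy : x = y
  · exact Or.inl hxy.symm
  · right
    by_cases hin : pvIn (pvPair x y) acc = false
    · have hstep : pvStepA x acc y = acc ++ [pvPair x y] := by simp [pvStepA, hxy, hin]
      rw [hstep, pvIn_append_singleton, pvEqual_refl]
      simp
    · have hint : pvIn (pvPair x y) acc = true := by simpa using hin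
      have hstep : pvStepA x acc y = acc := by simp [pvStepA, hxy, hint]
      rw [hstep]
      exact hint

theorem pvQin_h2 (x : String) (acc : List (List String)) (y : String) (h : pvQin x y acc) :
    pvStepA x acc y = acc := by
  rcases h with h | h
  · subst h; simp [pvStepA]
  · by_cases hxy : x = y
    · simp [pvStepA, hxy]
    · simp [pvStepA, hxy, h]

theorem pvQin_h3 (x : String) (acc : List (List String)) (y z : String) (h : pvQin x y acc) :
    pvQin x y (pvStepA x acc z) := by
  rcases h with h | h
  · exact Or.inl h
  · obtain ⟨ext, hext⟩ := pvStepA_prefix x acc z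
    exact Or.inr (by rw [hext]; exact pvIn_append h)

theorem pvInner_dedup (x : String) (l : List String) (acc : List (List String)) :
    l.foldl (pvStepA x) acc = (PySem.List.dedup l).foldl (pvStepA x) acc :=
  pvFoldl_dedup (pvStepA x) (pvQin x) (pvQin_h1 x) (pvQin_h2 x) (pvQin_h3 x) l acc

-- after the inner loop ran over l from any acc, every pair {x,z} with z ∈ l is recorded
theorem pvInner_ensures (x : String) :
    ∀ (l : List String) (acc : List (List String)) (z : String), z ∈ l → z ≠ x →
      pvIn (pvPair x z) (l.foldl (pvStepA x) acc) = true := by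
  intro l
  induction l with
  | nil => intro _ _ h; cases h
  | cons y ys ih =>
    intro acc z hz hzx
    rcases List.mem_cons.mp hz with rfl | hz
    · have : pvQin x z (pvStepA x acc z) := pvQin_h1 x acc z
      rcases this with h | h
      · exact absurd h hzx
      · obtain ⟨ext, hext⟩ := pvFoldlA_prefix x ys (pvStepA x acc z)
        simp only [List.foldl_cons]
        rw [hext]
        exact pvIn_append h
    · exact ih (pvStepA x acc y) z hz hzx

-- if every pair {x,z}, z ∈ l, is already recorded, the inner loop is a no-op
theorem pvInner_skip (x : String) :
    ∀ (l : List String) (acc : List (List String)),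
      (∀ z ∈ l, pvQin x z acc) → l.foldl (pvStepA x) acc = acc := by
  intro l
  induction l with
  | nil => intro _ _; rfl
  | cons y ys ih =>
    intro acc h
    simp only [List.foldl_cons]
    rw [pvQin_h2 x acc y (h y (List.mem_cons_self))]
    exact ih acc (fun z hz => h z (List.mem_cons_of_mem _ hz))

-- full characterisation of one inner pass over a duplicate-free list
theorem pvInner_char (x : String) :
    ∀ (l : List String) (acc : List (List String)), l.Nodup →
      l.foldl (pvStepA x) acc =
        acc ++ (l.filter (fun y => decide (y ≠ x) && !(pvIn (pvPair x y) acc))).map (pvPair x) := by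
  intro l
  induction l with
  | nil => intro acc _; simp
  | cons y ys ih =>
    intro acc hnd
    have hysnd : ys.Nodup := (List.nodup_cons.mp hnd).2
    have hyys : y ∉ ys := (List.nodup_cons.mp hnd).1
    by_cases hxy : x = y
    · subst hxy
      have hstep : pvStepA x acc x = acc := by simp [pvStepA]
      simp only [List.foldl_cons, hstep, List.filter_cons]
      rw [if_neg (by simp)]
      exact ih acc hysnd
    · by_cases hin : pvIn (pvPair x y) acc = true
      · have hstep : pvStepA x acc y = acc := pvQin_h2 x acc y (Or.inr hin)
        simp only [List.foldl_cons, hstep, List.filter_cons]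
        rw [if_neg (by simp [hin])]
        exact ih acc hysnd
      · have hinf : pvIn (pvPair x y) acc = false := by simpa using hin
        have hstep : pvStepA x acc y = acc ++ [pvPair x y] := by
          unfold pvStepA
          rw [if_pos hxy, if_pos hinf]
        simp only [List.foldl_cons, hstep, List.filter_cons]
        rw [ih (acc ++ [pvPair x y]) hysnd]
        have hfc : ys.filter (fun y' => decide (y' ≠ x) && !(pvIn (pvPair x y') (acc ++ [pvPair x y]))) =
            ys.filter (fun y' => decide (y' ≠ x) && !(pvIn (pvPair x y') acc)) := by
          apply List.filter_congr
          intro y' hy'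
          by_cases hy'x : y' = x
          · simp [hy'x]
          · have hyy' : y ≠ y' := fun h => hyys (h ▸ hy')
            have hxy' : x ≠ y := hxy
            have hxz' : x ≠ y' := fun h => hy'x h.symm
            have : PySem.Set.equal (pvPair x y) (pvPair x y') = false := by
              rw [pvPair_eq hxy', pvPair_eq hxz']
              rw [Bool.eq_false_iff]
              intro hc
              rcases (pvEqual_two_iff hxy' hxz').mp hc with ⟨_, h2⟩ | ⟨_, h2⟩
              · exact hyy' h2
              · exact hxy h2.symm
            rw [pvIn_append_singleton, this]
            simp
        rw [hfc]
        have hcond : (decide (y ≠ x) && !(pvIn (pvPair x y) acc)) = true := by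
          simp [hinf]
          exact fun h => hxy h.symm
        rw [if_pos hcond]
        simp

-- ----- facts about pvRows -----

theorem pvRows_mem : ∀ (d r : List String) (a z : String), a ∈ d → z ∈ r → pvPair a z ∈ pvRows d r := by
  intro d
  induction d with
  | nil => intro _ _ _ h; cases h
  | cons b d' ih =>
    intro r a z ha hz
    rcases List.mem_cons.mp ha with rfl | ha
    · exact List.mem_append.mpr (Or.inl (List.mem_map.mpr ⟨z, List.mem_append.mpr (Or.inr hz), rfl⟩))
    · exact List.mem_append.mpr (Or.inr (ih r a z ha hz))

theorem pvRows_mem_inv : ∀ (d r : List String), (d ++ r).Nodup → ∀ t ∈ pvRows d r,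
    ∃ a z, a ∈ d ∧ z ∈ d ++ r ∧ a ≠ z ∧ t = [a, z] := by
  intro d
  induction d with
  | nil => intro _ _ t ht; cases ht
  | cons b d' ih =>
    intro r hnd t ht
    have hb : b ∉ d' ++ r := (List.nodup_cons.mp hnd).1
    rcases List.mem_append.mp ht with ht | ht
    · obtain ⟨z, hz, rfl⟩ := List.mem_map.mp ht
      have hbz : b ≠ z := fun h => hb (h ▸ hz)
      exact ⟨b, z, List.mem_cons_self, List.mem_cons_of_mem _ hz, hbz, pvPair_eq hbz⟩
    · obtain ⟨a, z, ha, hz, haz, rfl⟩ := ih r (List.nodup_cons.mp hnd).2 t ht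
      exact ⟨a, z, List.mem_cons_of_mem _ ha, List.mem_cons_of_mem _ hz, haz, rfl⟩

theorem pvRows_snoc : ∀ (d : List String) (x : String) (r : List String),
    pvRows (d ++ [x]) r = pvRows d (x :: r) ++ r.map (pvPair x) := by
  intro d
  induction d with
  | nil => intro x r; simp [pvRows]
  | cons b d' ih =>
    intro x r
    show ((d' ++ [x]) ++ r).map (pvPair b) ++ pvRows (d' ++ [x]) r =
      (d' ++ x :: r).map (pvPair b) ++ pvRows d' (x :: r) ++ r.map (pvPair x)
    rw [ih x r]
    simp

theorem pvRows_nil_eq : ∀ (u : List String), pvRows u [] = pvPairsRec u := by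
  intro u
  induction u with
  | nil => rfl
  | cons a d ih => simp [pvRows, pvPairsRec, ih, pvPair]

-- ----- the outer loop over the duplicate-free unique list -----

theorem pvOuter_char (u : List String) (hu : u.Nodup) :
    ∀ (rest done : List String), u = done ++ rest →
      rest.foldl (fun acc n1 => u.foldl (pvStepA n1) acc) (pvRows done rest) = pvRows u [] := by
  intro rest
  induction rest with
  | nil => intro done hd; simp [hd]
  | cons n1 rest' ih =>
    intro done hd
    have hnd : (done ++ n1 :: rest').Nodup := by rw [← hd]; exact hu
    obtain ⟨hdone, hcons, hdisj⟩ := List.nodup_append.mp hnd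
    have hn1done : n1 ∉ done := fun h => hdisj n1 h n1 (List.mem_cons_self ..) rfl
    have hn1rest : n1 ∉ rest' := (List.nodup_cons.mp hcons).1
    simp only [List.foldl_cons]
    have hinner : u.foldl (pvStepA n1) (pvRows done (n1 :: rest')) =
        pvRows done (n1 :: rest') ++ rest'.map (pvPair n1) := by
      rw [pvInner_char n1 u (pvRows done (n1 :: rest')) hu]
      congr 1
      congr 1
      rw [hd]
      rw [List.filter_append]
      have hdpart : done.filter (fun y => decide (y ≠ n1) && !(pvIn (pvPair n1 y) (pvRows done (n1 :: rest')))) = [] := by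
        rw [List.filter_eq_nil_iff]
        intro y hy
        have hyn1 : y ≠ n1 := hdisj y hy n1 (List.mem_cons_self ..)
        have hmem : pvPair y n1 ∈ pvRows done (n1 :: rest') :=
          pvRows_mem done (n1 :: rest') y n1 hy (List.mem_cons_self ..)
        have hin : pvIn (pvPair n1 y) (pvRows done (n1 :: rest')) = true := by
          unfold pvIn
          rw [List.any_eq_true]
          refine ⟨pvPair y n1, hmem, ?_⟩
          rw [pvPair_eq hyn1, pvPair_eq (Ne.symm hyn1)]
          exact (pvEqual_two_iff hyn1 (Ne.symm hyn1)).mpr (Or.inr ⟨rfl, rfl⟩)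
        simp [hin]
      rw [hdpart, List.nil_append, List.filter_cons]
      rw [if_neg (by simp)]
      have hrpart : rest'.filter (fun y => decide (y ≠ n1) && !(pvIn (pvPair n1 y) (pvRows done (n1 :: rest')))) = rest' := by
        rw [List.filter_eq_self]
        intro y hy
        have hyn1 : y ≠ n1 := fun h => hn1rest (h ▸ hy)
        have hynodone : y ∉ done := fun h => hdisj y h y (List.mem_cons_of_mem _ hy) rfl
        have hin : pvIn (pvPair n1 y) (pvRows done (n1 :: rest')) = false := by
          unfold pvIn
          rw [Bool.eq_false_iff]
          intro hc
          rw [List.any_eq_true] at hc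
          obtain ⟨t, ht, heq⟩ := hc
          have hnd2 : (done ++ n1 :: rest').Nodup := hnd
          obtain ⟨a, z, ha, _, haz, rfl⟩ := pvRows_mem_inv done (n1 :: rest') hnd2 t ht
          rw [pvPair_eq (Ne.symm hyn1)] at heq
          rcases (pvEqual_two_iff haz (Ne.symm hyn1)).mp heq with ⟨h1, _⟩ | ⟨h1, _⟩
          · exact hn1done (h1 ▸ ha)
          · exact hynodone (h1 ▸ ha)
        simp [hyn1, hin]
      rw [hrpart]
    rw [hinner]
    have hrows : pvRows done (n1 :: rest') ++ rest'.map (pvPair n1) = pvRows (done ++ [n1]) rest' :=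
      (pvRows_snoc done n1 rest').symm
    rw [hrows]
    exact ih (done ++ [n1]) (by simpa using hd)

-- ----- the outer loop: Q is "every pair {n1,z}, z ∈ nodes, is recorded" -----

def pvQout (nodes : List String) (n1 : String) (acc : List (List String)) : Prop :=
  ∀ z ∈ nodes, z ≠ n1 → pvIn (pvPair n1 z) acc = true

theorem pvOuter_dedup (nodes : List String) :
    nodes.foldl (fun acc n1 => nodes.foldl (pvStepA n1) acc) [] =
      (PySem.List.dedup nodes).foldl (fun acc n1 => nodes.foldl (pvStepA n1) acc) [] := by
  apply pvFoldl_dedup (fun acc n1 => nodes.foldl (pvStepA n1) acc) (pvQout nodes)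
  · intro acc y z hz hzy
    exact pvInner_ensures y nodes acc z hz hzy
  · intro acc y h
    exact pvInner_skip y nodes acc (fun z hz => by
      by_cases hzy : z = y
      · exact Or.inl hzy
      · exact Or.inr (h z hz hzy))
  · intro acc y z h w hw hwy
    obtain ⟨ext, hext⟩ := pvFoldlA_prefix z nodes acc
    rw [hext]
    exact pvIn_append (h w hw hwy)

-- ===== VERDICT (by name: the statement is the Claim_ definition above) =====
theorem find_node_pairs_spec : Claim_equal_find_node_pairs := by
  intro nodes _
  show find_node_pairs nodes = find_node_pairs_alt nodes
  unfold find_node_pairs find_node_pairs_alt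
  rw [pvOuter_dedup nodes]
  have hcong : (PySem.List.dedup nodes).foldl (fun acc n1 => nodes.foldl (pvStepA n1) acc) [] =
      (PySem.List.dedup nodes).foldl (fun acc n1 => (PySem.List.dedup nodes).foldl (pvStepA n1) acc) [] := by
    have : (fun (acc : List (List String)) n1 => nodes.foldl (pvStepA n1) acc) =
        (fun acc n1 => (PySem.List.dedup nodes).foldl (pvStepA n1) acc) := by
      funext acc n1
      exact pvInner_dedup n1 nodes acc
    rw [this]
  rw [hcong]
  have := pvOuter_char (PySem.List.dedup nodes) (PySem.List.nodup_dedup nodes)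
    (PySem.List.dedup nodes) [] rfl
  simp only [pvRows] at this
  rw [this]
  exact pvRows_nil_eq _
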